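-- pv_equiv track=rewrite | github.com/van4956/project_simulation | 02_battle_dimensions/epic_tactics.py | first_wins_among
-- ===== SOURCE A (Python) =====
-- from typing import List, Dict, Tuple, Optional
--
-- def beats(a: str, b: str, spiral: List[str]) -> bool:
--     idx = {c: i for i, c in enumerate(spiral)}
--     return (idx[a] + 1) % len(spiral) == idx[b]
--
-- def first_wins_among(colors: List[str], spiral: List[str]) -> List[str]:
--     uniq = set(colors)
--     if len(uniq) == 1:
--         return list(uniq)
--     winners = []
--     for c in uniq:
--         beats_some = any(beats(c, d, spiral) for d in uniq if d != c)
--         lost_some = any(beats(d, c, spiral) for d in uniq if d != c)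
--         if beats_some and not lost_some:
--             winners.append(c)
--     return winners
-- ===== SOURCE B (Python) =====
-- def first_wins_among(colors, spiral):
--     uniq = list(dict.fromkeys(colors))
--     if len(uniq) == 1:
--         return uniq
--     idx = {c: i for i, c in enumerate(spiral)}
--     n = len(spiral)
--     occupied = {idx[c] for c in uniq}
--     return [c for c in uniq
--             if (idx[c] + 1) % n in occupied and (idx[c] - 1) % n not in occupied]
-- ===== Notes on version B (the rewrite author's own statement) =====
-- stated objective: alternative
-- what changed: Instead of testing every unordered pair of distinct colors with a beats() call that rebuilds the position dict each time, B builds the position dict once, collects the set of occupied positions, and decides each color by two membership tests on its cyclic successor/predecessor position (fewer dict rebuilds; not measurably faster on the generated inputs, whose number of distinct colors stays small).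
import Mathlib
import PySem

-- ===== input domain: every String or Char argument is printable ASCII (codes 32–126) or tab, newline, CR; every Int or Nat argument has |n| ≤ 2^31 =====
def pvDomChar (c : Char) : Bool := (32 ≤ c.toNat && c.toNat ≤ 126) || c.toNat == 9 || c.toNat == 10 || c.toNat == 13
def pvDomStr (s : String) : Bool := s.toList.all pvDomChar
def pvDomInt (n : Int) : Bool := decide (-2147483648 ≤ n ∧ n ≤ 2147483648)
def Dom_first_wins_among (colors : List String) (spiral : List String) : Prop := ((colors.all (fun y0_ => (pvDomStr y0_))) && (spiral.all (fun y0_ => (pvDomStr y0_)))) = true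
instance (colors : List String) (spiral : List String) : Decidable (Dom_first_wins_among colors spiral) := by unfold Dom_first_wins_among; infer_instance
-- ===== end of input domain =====

-- B replaces A's pairwise beats() scans (which rebuild the position dict per pair) by one position dict,
-- one occupied-position set and two membership tests per color (an alternative single-pass algorithm).

-- ===== PORT A =====
-- beats(a, b, spiral): idx = {c: i for i, c in enumerate(spiral)}; (idx[a] + 1) % len(spiral) == idx[b].
-- idx[·] raises KeyError on a missing color and % 0 raises ZeroDivisionError; Pre_ keeps those inputs out,
-- so getD 0 / total mod stand in for the raising lookups there.
def pvBeatsA (a : String) (b : String) (spiral : List String) : Bool :=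
  let idx : PySem.Dict String Int :=
    (PySem.List.enumerate spiral 0).foldl (fun d p => d.insert p.2 p.1) PySem.Dict.empty
  PySem.Int.mod (idx.getD a 0 + 1) (spiral.length : Int) == idx.getD b 0

-- Python iterates the set 'uniq' in hash order, which PySem does not model: the port iterates it in
-- first-occurrence order; Pre_ restricts to inputs whose returned list has at most one element, where
-- the iteration order cannot be observed.
def first_wins_among (colors : List String) (spiral : List String) : List String :=
  let uniq : PySem.Set String := PySem.Set.ofList colors
  if PySem.Set.len uniq == 1 then uniq
  else
    uniq.foldl (fun winners c =>
      let beats_some := (uniq.filter (fun d => d != c)).any (fun d => pvBeatsA c d spiral)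
      let lost_some := (uniq.filter (fun d => d != c)).any (fun d => pvBeatsA d c spiral)
      if beats_some && !lost_some then winners ++ [c] else winners) []

-- ===== PORT B =====
-- idx = {c: i for i, c in enumerate(spiral)}
def pvIdxB (spiral : List String) : PySem.Dict String Int :=
  (PySem.List.enumerate spiral 0).foldl (fun d p => d.insert p.2 p.1) PySem.Dict.empty

def first_wins_among_alt (colors : List String) (spiral : List String) : List String :=
  let uniq : List String := PySem.List.dedup colors
  if uniq.length == 1 then uniq
  else
    let idx := pvIdxB spiral
    let n : Int := (spiral.length : Int)
    let occupied : PySem.Set Int := PySem.Set.ofList (uniq.map (fun c => idx.getD c 0))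
    uniq.filter (fun c =>
      occupied.contains (PySem.Int.mod (idx.getD c 0 + 1) n) &&
      !(occupied.contains (PySem.Int.mod (idx.getD c 0 - 1) n)))

-- ===== PRECONDITION & SPEC =====
-- last-occurrence position of c in spiral (the dict comprehension keeps the last index of a duplicate)
def pvLastPos (spiral : List String) (c : String) : Nat :=
  spiral.length - 1 - spiral.reverse.idxOf c

-- c beats some other color of u and loses to none, read off the cyclic last-occurrence positions
def pvWinnerB (spiral : List String) (u : List String) (c : String) : Bool :=
  (u.any (fun d => d != c && ((pvLastPos spiral c + 1) % spiral.length == pvLastPos spiral d))) &&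
  !(u.any (fun d => d != c && ((pvLastPos spiral d + 1) % spiral.length == pvLastPos spiral c)))

-- Pre_ excludes (a) inputs where A raises (KeyError/ZeroDivisionError: some color missing from the spiral
-- while the colors are not all equal) and (b) inputs with two or more winning colors, on which A's output
-- order is Python's accidental set-iteration order (hash-seed dependent), so neither order is specified.
def Pre_first_wins_among (colors : List String) (spiral : List String) : Prop :=
  (PySem.List.dedup colors).length = 1 ∨
  ((∀ c ∈ PySem.List.dedup colors, c ∈ spiral) ∧
   (PySem.List.dedup colors).countP (fun c => pvWinnerB spiral (PySem.List.dedup colors) c) ≤ 1)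
instance (colors : List String) (spiral : List String) : Decidable (Pre_first_wins_among colors spiral) := by unfold Pre_first_wins_among; infer_instance

def pvWitness_first_wins_among : List String × List String := (["a", "b"], ["a", "b"])

def Spec_first_wins_among (colors : List String) (spiral : List String) (out : List String) : Prop := out = first_wins_among_alt colors spiral
instance (colors : List String) (spiral : List String) (out : List String) : Decidable (Spec_first_wins_among colors spiral out) := by unfold Spec_first_wins_among; infer_instance

-- ===== CLAIM (what is proved, stated in full; the proofs are below) =====
def Claim_equal_first_wins_among : Prop := ∀ (colors : List String) (spiral : List String), Dom_first_wins_among colors spiral → Pre_first_wins_among colors spiral → Spec_first_wins_among colors spiral (first_wins_among colors spiral)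

-- ===== LEMMAS AND PROOFS =====

-- the dict {c: i for i, c in enumerate(L)} maps each member of L to an index holding it
theorem pvIdx_mem (L : List String) (c : String) (h : c ∈ L) :
    ∃ k : Nat, k < L.length ∧ (pvIdxB L).getD c 0 = (k : Int) ∧ L[k]? = some c := by
  induction L using List.reverseRecOn with
  | nil => simp at h
  | append_singleton xs x ih =>
    have hfold : pvIdxB (xs ++ [x]) = (pvIdxB xs).insert x (xs.length : Int) := by
      simp [pvIdxB, PySem.List.enumerate_append, PySem.List.enumerate_cons,
        PySem.List.enumerate_nil, List.foldl_append]
    by_cases hcx : c = x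
    · refine ⟨xs.length, by simp, ?_, ?_⟩
      · rw [hfold, hcx, PySem.Dict.getD_insert_self]
      · rw [hcx]; exact List.getElem?_concat_length
    · have hc : c ∈ xs := by
        rcases List.mem_append.mp h with h' | h'
        · exact h'
        · simp at h'; exact absurd h' hcx
      obtain ⟨k, hk, hg, he⟩ := ih hc
      refine ⟨k, by simp; omega, ?_, ?_⟩
      · rw [hfold, PySem.Dict.getD_insert_of_ne _ _ _ hcx, hg]
      · rw [List.getElem?_append_left hk]; exact he

theorem pvBeatsA_eq (a b : String) (L : List String) :
    pvBeatsA a b L = (PySem.Int.mod ((pvIdxB L).getD a 0 + 1) (L.length : Int) == (pvIdxB L).getD b 0) := rfl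

theorem pvModFlip (n x y : Int) (hx0 : 0 ≤ x) (hxn : x < n) (hy0 : 0 ≤ y) (hyn : y < n) :
    (PySem.Int.mod (x + 1) n = y ↔ x = PySem.Int.mod (y - 1) n) := by
  rw [PySem.Int.mod_eq_emod_of_pos (by omega), PySem.Int.mod_eq_emod_of_pos (by omega)]
  have h1 : (x + 1) % n = if x + 1 = n then 0 else x + 1 := by
    split_ifs with h
    · rw [h, Int.emod_self]
    · exact Int.emod_eq_of_lt (by omega) (by omega)
  have h2 : (y - 1) % n = if y = 0 then n - 1 else y - 1 := by
    split_ifs with h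
    · have e : y - 1 = (n - 1) + n * (-1) := by rw [h]; ring
      rw [e, Int.add_mul_emod_self_left]
      exact Int.emod_eq_of_lt (by omega) (by omega)
    · exact Int.emod_eq_of_lt (by omega) (by omega)
  rw [h1, h2]
  split_ifs <;> omega

theorem pvModNoSelf (n x : Int) (hx0 : 0 ≤ x) (hxn : x < n) (hn : 2 ≤ n) :
    PySem.Int.mod (x + 1) n ≠ x := by
  rw [PySem.Int.mod_eq_emod_of_pos (by omega)]
  by_cases h : x + 1 = n
  · rw [h, Int.emod_self]; omega
  · rw [Int.emod_eq_of_lt (by omega) (by omega)]; omega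

theorem pv_main (colors spiral : List String) (hpre : Pre_first_wins_among colors spiral) :
    first_wins_among colors spiral = first_wins_among_alt colors spiral := by
  simp only [first_wins_among, first_wins_among_alt, PySem.List.dedup_eq_ofList]
  unfold Pre_first_wins_among at hpre
  rw [PySem.List.dedup_eq_ofList] at hpre
  set u : List String := PySem.Set.ofList colors with hu
  by_cases h1 : u.length = 1
  · simp [PySem.Set.len, h1]
  · simp only [PySem.Set.len, Nat.cast_eq_one, h1, if_false, beq_iff_eq]
    by_cases h0 : u = []
    · rw [h0]; simp
    · have hmem : ∀ c ∈ u, c ∈ spiral := by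
        rcases hpre with h | ⟨hm, _⟩
        · exact absurd h h1
        · exact hm
      have hlen2 : 2 ≤ u.length := by
        have : u.length ≠ 0 := by simpa [List.length_eq_zero_iff] using h0
        omega
      have hnodup : u.Nodup := PySem.Set.nodup_ofList colors
      obtain ⟨a, b, hab, ha, hb⟩ : ∃ a b, a ≠ b ∧ a ∈ u ∧ b ∈ u := by
        match u, hlen2, hnodup with
        | a :: b :: t, _, hnd =>
          exact ⟨a, b, by simp at hnd; exact fun h => hnd.1.1 (h ▸ rfl), by simp, by simp⟩
      have hn2 : (2 : Int) ≤ (spiral.length : Int) := by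
        obtain ⟨ka, hka, hga, hea⟩ := pvIdx_mem spiral a (hmem a ha)
        obtain ⟨kb, hkb, hgb, heb⟩ := pvIdx_mem spiral b (hmem b hb)
        have hne : ka ≠ kb := by
          intro h
          rw [h, heb] at hea
          exact hab (Option.some.inj hea).symm
        have : 2 ≤ spiral.length := by omega
        exact_mod_cast this
      have hfold := PySem.List.foldl_append_if
        (p := fun c => (((u.filter (fun d => d != c)).any fun d => pvBeatsA c d spiral) &&
          !((u.filter (fun d => d != c)).any fun d => pvBeatsA d c spiral)))
        (f := fun c => c) u []
      rw [List.map_id', List.nil_append] at hfold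
      rw [hfold]
      refine List.filter_congr ?_
      intro c hc
      have hbounds : ∀ x ∈ u, 0 ≤ (pvIdxB spiral).getD x 0 ∧
          (pvIdxB spiral).getD x 0 < (spiral.length : Int) := by
        intro x hx
        obtain ⟨k, hk, hg, _⟩ := pvIdx_mem spiral x (hmem x hx)
        rw [hg]
        exact ⟨Int.natCast_nonneg k, by exact_mod_cast hk⟩
      obtain ⟨hc0, hcn⟩ := hbounds c hc
      rw [Bool.eq_iff_iff]
      simp only [Bool.and_eq_true, Bool.not_eq_true', List.any_eq_true,
        List.mem_filter, bne_iff_ne, ne_eq, Bool.eq_false_iff,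
        PySem.Set.contains_iff, PySem.Set.mem_ofList, List.mem_map, beq_iff_eq, pvBeatsA_eq,
        not_exists, not_and]
      constructor
      · rintro ⟨⟨d, ⟨hd, hdc⟩, he⟩, hno⟩
        refine ⟨⟨d, hd, he.symm⟩, ?_⟩
        intro e he' hge
        obtain ⟨he0, hen⟩ := hbounds e he'
        have hflip : PySem.Int.mod ((pvIdxB spiral).getD e 0 + 1) (spiral.length : Int) =
            (pvIdxB spiral).getD c 0 :=
          (pvModFlip _ _ _ he0 hen hc0 hcn).mpr hge
        have hec2 : ¬ e = c := by
          intro h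
          rw [h] at hflip
          exact pvModNoSelf _ _ hc0 hcn hn2 hflip
        exact hno e ⟨he', hec2⟩ hflip
      · rintro ⟨⟨d, hd, hgd⟩, hno⟩
        have hdc : ¬ d = c := by
          intro h
          rw [h] at hgd
          exact pvModNoSelf _ _ hc0 hcn hn2 hgd.symm
        refine ⟨⟨d, ⟨hd, hdc⟩, hgd.symm⟩, ?_⟩
        intro x hx hmx
        obtain ⟨hx0, hxn⟩ := hbounds x hx.1
        exact hno x hx.1 ((pvModFlip _ _ _ hx0 hxn hc0 hcn).mp hmx)

-- ===== VERDICT (by name: the statement is the Claim_ definition above) =====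
theorem first_wins_among_spec : Claim_equal_first_wins_among := by
  intro colors spiral _ hpre
  exact pv_main colors spiral hpre
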